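-- pv_equiv track=rewrite | github.com/toriboo/Alg1 | main.py | gaps_shell
-- ===== SOURCE A (Python) =====
-- def gaps_shell(A):
--     gaps = []
--     n = len(A)
--     n //= 2
--     while (n >= 1):
--         gaps.append(n)
--         n //= 2
--     return gaps
-- ===== SOURCE B (Python) =====
-- def gaps_shell(A):
--     # Read the binary digits of len(A) MSB-first; each prefix of the digit
--     # string is a gap. Horner-accumulate the prefixes (ascending), then reverse.
--     bits = bin(len(A))[2:]
--     gaps = []
--     acc = 0
--     for b in bits[:-1]:
--         acc = acc * 2 + (b == '1')
--         gaps.append(acc)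
--     gaps.reverse()
--     return gaps
-- ===== Notes on version B (the rewrite author's own statement) =====
-- stated objective: alternative
-- what changed: B derives each gap as a Horner-accumulated prefix of the binary digit string of len(A) read MSB-first (building the output ascending and reversing), instead of A's descending repeated floor-halving loop with an accumulator.
import Mathlib
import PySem

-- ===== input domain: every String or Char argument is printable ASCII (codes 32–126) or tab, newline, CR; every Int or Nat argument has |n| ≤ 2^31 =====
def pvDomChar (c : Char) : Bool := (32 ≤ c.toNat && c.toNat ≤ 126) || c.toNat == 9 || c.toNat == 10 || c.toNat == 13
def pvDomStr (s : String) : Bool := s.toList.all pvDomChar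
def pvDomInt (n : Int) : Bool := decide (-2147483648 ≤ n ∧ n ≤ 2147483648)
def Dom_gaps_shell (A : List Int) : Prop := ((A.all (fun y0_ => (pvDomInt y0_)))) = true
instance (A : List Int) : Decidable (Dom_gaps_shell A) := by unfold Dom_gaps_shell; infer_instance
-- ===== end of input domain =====

-- B derives each gap as a Horner-accumulated prefix of the binary digits of len(A) (MSB-first),
-- built ascending and reversed, instead of A's descending repeated floor-halving loop.

-- ===== PORT A =====
-- the while loop with accumulator `gaps`; n starts as len(A)//2 >= 0, so Python's // 2 is Nat division
def gapsLoopA (n : Nat) (gaps : List Int) : List Int :=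
  if 1 <= n then gapsLoopA (n / 2) (gaps ++ [(n : Int)]) else gaps
decreasing_by exact Nat.div_lt_self (by omega) (by omega)

def gaps_shell (A : List Int) : List Int :=
  gapsLoopA (A.length / 2) []

-- ===== PORT B =====
-- hand port of bin(n)[2:] for n >= 0: MSB-first binary digit characters ('0' for n = 0); exact on Nat
def pyBin (n : Nat) : List Char :=
  if n < 2 then [if n = 1 then '1' else '0']
  else pyBin (n / 2) ++ [if n % 2 = 1 then '1' else '0']
decreasing_by exact Nat.div_lt_self (by omega) (by omega)

-- the loop body: acc = acc*2 + (b == '1'); gaps.append(acc)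
def bStep (st : Int × List Int) (c : Char) : Int × List Int :=
  (st.1 * 2 + (if c = '1' then 1 else 0), st.2 ++ [st.1 * 2 + (if c = '1' then 1 else 0)])

def gaps_shell_alt (A : List Int) : List Int :=
  (((pyBin A.length).dropLast).foldl bStep (0, [])).2.reverse

-- ===== PRECONDITION & SPEC =====
def Spec_gaps_shell (A : List Int) (out : List Int) : Prop := out = gaps_shell_alt A
instance (A : List Int) (out : List Int) : Decidable (Spec_gaps_shell A out) := by unfold Spec_gaps_shell; infer_instance

-- ===== CLAIM (what is proved, stated in full; the proofs are below) =====
def Claim_equal_gaps_shell : Prop := ∀ (A : List Int), Dom_gaps_shell A → Spec_gaps_shell A (gaps_shell A)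

-- ===== LEMMAS AND PROOFS =====

-- ===== VERDICT (by name: the statement is the Claim_ definition above) =====
theorem gapsLoopA_acc (n : Nat) (gaps : List Int) :
    gapsLoopA n gaps = gaps ++ gapsLoopA n [] := by
  induction n using Nat.strong_induction_on generalizing gaps with
  | _ n ih =>
    unfold gapsLoopA
    split_ifs with h
    · rw [List.nil_append,
        ih (n / 2) (Nat.div_lt_self (by omega) (by omega)) (gaps := gaps ++ [(n : Int)]),
        ih (n / 2) (Nat.div_lt_self (by omega) (by omega)) (gaps := [(n : Int)])]
      simp
    · simp

theorem foldl_pyBin_fst (m : Nat) :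
    (((pyBin m).foldl bStep (0, [])).1) = (m : Int) := by
  induction m using Nat.strong_induction_on with
  | _ m ih =>
    by_cases h : m < 2
    · rw [pyBin, if_pos h]
      interval_cases m <;> simp [bStep]
    · rw [pyBin, if_neg h, List.foldl_append,
        List.foldl_cons, List.foldl_nil]
      simp only [bStep, ih (m / 2) (Nat.div_lt_self (by omega) (by omega))]
      by_cases h2 : m % 2 = 1
      · simp only [h2]
        rw [if_pos (by decide)]
        push_cast
        omega
      · have h0 : m % 2 = 0 := by omega
        simp only [h0]
        rw [if_neg (by decide)]
        push_cast
        omega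

theorem gapsLoopA_cons (m : Nat) (h : 1 <= m) :
    gapsLoopA m [] = (m : Int) :: gapsLoopA (m / 2) [] := by
  rw [gapsLoopA, if_pos h, gapsLoopA_acc]
  simp

theorem foldl_pyBin_snd (m : Nat) (hm : 1 <= m) :
    (((pyBin m).foldl bStep (0, [])).2).reverse = gapsLoopA m [] := by
  induction m using Nat.strong_induction_on with
  | _ m ih =>
    by_cases h : m < 2
    · have : m = 1 := by omega
      subst this
      have hz : gapsLoopA 0 [] = [] := by rw [gapsLoopA]; norm_num
      rw [pyBin, if_pos (by omega), gapsLoopA_cons 1 (by omega)]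
      norm_num [hz, bStep]
    · rw [pyBin, if_neg h, List.foldl_append, List.foldl_cons, List.foldl_nil,
        gapsLoopA_cons m (by omega)]
      simp only [bStep]
      have hfst := foldl_pyBin_fst (m / 2)
      have hsnd := ih (m / 2) (Nat.div_lt_self (by omega) (by omega)) (by omega)
      have hval : ((((pyBin (m / 2)).foldl bStep (0, [])).1) * 2 +
          (if (if m % 2 = 1 then '1' else '0') = '1' then (1 : Int) else 0)) = (m : Int) := by
        rw [hfst]
        by_cases h2 : m % 2 = 1
        · simp only [h2]
          rw [if_pos (by decide)]
          push_cast
          omega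
        · have h0 : m % 2 = 0 := by omega
          simp only [h0]
          rw [if_neg (by decide)]
          push_cast
          omega
      simp only [hval, List.reverse_append, List.reverse_cons, List.reverse_nil,
        List.nil_append, List.cons_append, hsnd]

theorem dropLast_pyBin (n : Nat) (h : 2 <= n) :
    (pyBin n).dropLast = pyBin (n / 2) := by
  rw [pyBin, if_neg (by omega : ¬ n < 2), List.dropLast_concat]

-- ===== VERDICT (by name: the statement is the Claim_ definition above) =====
theorem gaps_shell_spec : Claim_equal_gaps_shell := by
  intro A _
  show gaps_shell A = gaps_shell_alt A
  rw [gaps_shell, gaps_shell_alt]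
  by_cases h : A.length < 2
  · have h2 : A.length / 2 = 0 := by omega
    rw [h2, gapsLoopA]
    unfold pyBin
    rw [if_pos h]
    simp
  · rw [dropLast_pyBin A.length (by omega),
      foldl_pyBin_snd (A.length / 2) (by omega)]
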